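-- pv_equiv track=rewrite | github.com/GeometricAGI/blog | ast-edits/localised_edit_experiments/edit_methods/ast_edit.py | _replace_imports
-- ===== SOURCE A (Python) =====
-- def _replace_imports(lines: list[str], content: str) -> list[str]:
--     """Replace the entire import block at the top of the file."""
--     first_import = -1
--     last_import = -1
--     for i, line in enumerate(lines):
--         stripped = line.strip()
--         if stripped.startswith(("import ", "from ")):
--             if first_import == -1:
--                 first_import = i
--             last_import = i
--
--     if first_import == -1:
--         # No imports found, insert at top
--         new_lines = content.splitlines()
--         return [*new_lines, "", *lines]
--
--     new_lines = content.splitlines()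
--     return [*lines[:first_import], *new_lines, *lines[last_import + 1 :]]
-- ===== SOURCE B (Python) =====
-- def _replace_imports(lines: list[str], content: str) -> list[str]:
--     """Replace the entire import block at the top of the file."""
--     def is_import(line: str) -> bool:
--         s = line.strip()
--         return s.startswith("import ") or s.startswith("from ")
--
--     # Single pass that builds the output segments directly, without indices or
--     # slicing: `pre` collects the lines before the first import; `post` is the
--     # suffix after the most recently seen import (reset at each import line),
--     # so at the end it holds the lines after the last import.
--     pre: list[str] = []
--     post = None
--     for line in lines:
--         if is_import(line):
--             post = []
--         elif post is None:
--             pre.append(line)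
--         else:
--             post.append(line)
--     if post is None:
--         return [*content.splitlines(), "", *lines]
--     return [*pre, *content.splitlines(), *post]
-- ===== Notes on version B (the rewrite author's own statement) =====
-- stated objective: alternative
-- what changed: A tracks first/last import indices in one pass and then slices the list; B never computes indices: a single pass builds the output segments themselves, accumulating the pre-import prefix and resetting/accumulating the after-last-import suffix, then concatenates them around the new import block.
import Mathlib
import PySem

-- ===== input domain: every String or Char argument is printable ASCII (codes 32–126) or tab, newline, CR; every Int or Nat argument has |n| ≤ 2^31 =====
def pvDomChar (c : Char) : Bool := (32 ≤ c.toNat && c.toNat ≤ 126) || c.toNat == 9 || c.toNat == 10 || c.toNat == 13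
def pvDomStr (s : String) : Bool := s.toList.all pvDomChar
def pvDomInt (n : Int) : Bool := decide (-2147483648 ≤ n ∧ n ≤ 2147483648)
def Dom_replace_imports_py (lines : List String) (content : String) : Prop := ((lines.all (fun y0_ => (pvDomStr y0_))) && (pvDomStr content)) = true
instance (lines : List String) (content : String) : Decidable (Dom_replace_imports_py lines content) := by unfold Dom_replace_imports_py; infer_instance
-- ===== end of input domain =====

-- B never computes boundary indices: instead of A's index tracking + slicing, one pass
-- builds the output segments (prefix before the first import, suffix after the last
-- import) directly and concatenates them (objective: alternative, same cost).

-- ===== PORT A =====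
-- literal port of A: one enumerate-fold tracking (first_import, last_import), then the two branches
def replace_imports_py (lines : List String) (content : String) : List String :=
  let p := (PySem.List.enumerate lines).foldl
    (fun (st : Int × Int) (il : Int × String) =>
      let stripped := PySem.Str.strip il.2
      if PySem.Str.startswith stripped "import " || PySem.Str.startswith stripped "from " then
        (if st.1 = -1 then il.1 else st.1, il.1)
      else st) (-1, -1)
  if p.1 = -1 then
    PySem.Str.splitlines content ++ [""] ++ lines
  else
    PySem.List.slice lines none (some p.1) ++ PySem.Str.splitlines content ++
      PySem.List.slice lines (some (p.2 + 1)) none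

-- ===== PORT B =====
-- B's helper is_import
def pvIsImport (line : String) : Bool :=
  let s := PySem.Str.strip line
  PySem.Str.startswith s "import " || PySem.Str.startswith s "from "

-- B: single pass building the segments (pre, post); post = none until the first import,
-- reset to [] at every import line, lines accumulated into pre/post otherwise
def replace_imports_py_alt (lines : List String) (content : String) : List String :=
  let st := lines.foldl
    (fun (st : List String × Option (List String)) (line : String) =>
      if pvIsImport line then (st.1, some [])
      else match st.2 with
        | none => (st.1 ++ [line], none)
        | some p => (st.1, some (p ++ [line]))) ([], none)
  match st.2 with
  | none => PySem.Str.splitlines content ++ [""] ++ lines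
  | some post => st.1 ++ PySem.Str.splitlines content ++ post

-- ===== PRECONDITION & SPEC =====
def Spec_replace_imports_py (lines : List String) (content : String) (out : List String) : Prop := out = replace_imports_py_alt lines content
instance (lines : List String) (content : String) (out : List String) : Decidable (Spec_replace_imports_py lines content out) := by unfold Spec_replace_imports_py; infer_instance

-- ===== CLAIM (what is proved, stated in full; the proofs are below) =====
def Claim_equal_replace_imports_py : Prop := ∀ (lines : List String) (content : String), Dom_replace_imports_py lines content → Spec_replace_imports_py lines content (replace_imports_py lines content)

-- ===== LEMMAS AND PROOFS =====

-- A's fold step, named for the proofs (definitionally equal to the inline lambda in the port)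
def pvStep (st : Int × Int) (il : Int × String) : Int × Int :=
  if pvIsImport il.2 then (if st.1 = -1 then il.1 else st.1, il.1) else st

-- B's fold step, named for the proofs
def pvBStep (st : List String × Option (List String)) (line : String) : List String × Option (List String) :=
  if pvIsImport line then (st.1, some [])
  else match st.2 with
    | none => (st.1 ++ [line], none)
    | some p => (st.1, some (p ++ [line]))

-- index of the LAST line satisfying p, proof-side characterisation
def pvLastIdx? (p : String → Bool) : List String → Option Nat
  | [] => none
  | x :: l => match pvLastIdx? p l with
    | some j => some (j + 1)
    | none => if p x then some 0 else none

lemma fold_fst_found (l : List String) : ∀ (s : Int) (st : Int × Int), st.1 ≠ -1 →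
    ((PySem.List.enumerate l s).foldl pvStep st).1 = st.1 := by
  induction l with
  | nil => intro s st h; simp [PySem.List.enumerate_nil]
  | cons x l ih =>
      intro s st h
      rw [PySem.List.enumerate_cons, List.foldl_cons]
      by_cases hp : pvIsImport x
      · simpa [pvStep, hp, if_neg h] using ih (s + 1) (st.1, s) h
      · simpa [pvStep, hp] using ih (s + 1) st h

lemma fold_fst_none (l : List String) : ∀ (s : Int) (li : Int), 0 ≤ s →
    ((PySem.List.enumerate l s).foldl pvStep (-1, li)).1
      = (match l.findIdx? pvIsImport with | none => -1 | some f => s + f) := by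
  induction l with
  | nil => intro s li _; simp [PySem.List.enumerate_nil, List.findIdx?_nil]
  | cons x l ih =>
      intro s li hs
      rw [PySem.List.enumerate_cons, List.foldl_cons, List.findIdx?_cons]
      by_cases hp : pvIsImport x
      · have hne : s ≠ -1 := by omega
        simpa [pvStep, hp] using fold_fst_found l (s + 1) (s, s) hne
      · have := ih (s + 1) li (by omega)
        simp only [pvStep, hp, Bool.false_eq_true, if_false]
        rw [this]
        cases l.findIdx? pvIsImport with
        | none => simp
        | some f => simp; ring

lemma fold_snd (l : List String) : ∀ (s : Int) (st : Int × Int),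
    ((PySem.List.enumerate l s).foldl pvStep st).2
      = (match pvLastIdx? pvIsImport l with | none => st.2 | some j => s + j) := by
  induction l with
  | nil => intro s st; simp [PySem.List.enumerate_nil, pvLastIdx?]
  | cons x l ih =>
      intro s st
      rw [PySem.List.enumerate_cons, List.foldl_cons]
      by_cases hp : pvIsImport x
      · rw [show pvStep st (s, x) = (if st.1 = -1 then s else st.1, s) by simp [pvStep, hp]]
        rw [ih (s + 1) _]
        simp only [pvLastIdx?]
        cases h : pvLastIdx? pvIsImport l with
        | none => simp [hp]
        | some j => simp; ring
      · rw [show pvStep st (s, x) = st by simp [pvStep, hp]]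
        rw [ih (s + 1) st]
        simp only [pvLastIdx?]
        cases h : pvLastIdx? pvIsImport l with
        | none => simp [hp]
        | some j => simp; ring

lemma lastIdx?_isSome_of_find (l : List String) (f : Nat) (h : l.findIdx? pvIsImport = some f) :
    ∃ j, pvLastIdx? pvIsImport l = some j := by
  induction l generalizing f with
  | nil => simp [List.findIdx?_nil] at h
  | cons x l ih =>
      simp only [pvLastIdx?]
      cases hl : pvLastIdx? pvIsImport l with
      | some j => exact ⟨j + 1, rfl⟩
      | none =>
          by_cases hp : pvIsImport x
          · exact ⟨0, by simp [hp]⟩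
          · rw [List.findIdx?_cons, if_neg (by simp [hp])] at h
            cases hf : l.findIdx? pvIsImport with
            | none => rw [hf] at h; simp at h
            | some f' =>
                obtain ⟨j, hj⟩ := ih f' hf
                rw [hj] at hl; exact absurd hl (by simp)

lemma find_isSome_of_lastIdx (l : List String) (j : Nat) (hl : pvLastIdx? pvIsImport l = some j) :
    ∃ f, l.findIdx? pvIsImport = some f := by
  induction l generalizing j with
  | nil => simp [pvLastIdx?] at hl
  | cons x l ih =>
      rw [List.findIdx?_cons]
      by_cases hp : pvIsImport x
      · exact ⟨0, by simp [hp]⟩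
      · simp only [pvLastIdx?] at hl
        cases hl2 : pvLastIdx? pvIsImport l with
        | some j' =>
            obtain ⟨f, hfs⟩ := ih j' hl2
            exact ⟨f + 1, by simp [hp, hfs]⟩
        | none => rw [hl2] at hl; simp [hp] at hl

-- B's fold from a post-active state: pre is frozen, post becomes the suffix after the last import
lemma bfold_from_some (l : List String) : ∀ (pre p : List String),
    l.foldl pvBStep (pre, some p)
      = (pre, some (match pvLastIdx? pvIsImport l with
          | none => p ++ l
          | some j => l.drop (j + 1))) := by
  induction l with
  | nil => intro pre p; simp [pvLastIdx?]
  | cons x l ih =>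
      intro pre p
      rw [List.foldl_cons]
      by_cases hp : pvIsImport x
      · rw [show pvBStep (pre, some p) x = (pre, some []) by simp [pvBStep, hp]]
        rw [ih pre []]
        simp only [pvLastIdx?]
        cases h : pvLastIdx? pvIsImport l with
        | none => simp [hp]
        | some j => simp
      · rw [show pvBStep (pre, some p) x = (pre, some (p ++ [x])) by simp [pvBStep, hp]]
        rw [ih pre (p ++ [x])]
        simp only [pvLastIdx?]
        cases h : pvLastIdx? pvIsImport l with
        | none => simp [hp]
        | some j => simp

-- B's fold from the initial (pre, none) state, characterised by findIdx? and pvLastIdx?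
lemma bfold_from_none (l : List String) : ∀ (pre : List String),
    l.foldl pvBStep (pre, none)
      = (match pvLastIdx? pvIsImport l with
          | none => (pre ++ l, none)
          | some j =>
              (pre ++ (match l.findIdx? pvIsImport with
                       | none => l
                       | some f => l.take f), some (l.drop (j + 1)))) := by
  induction l with
  | nil => intro pre; simp [pvLastIdx?]
  | cons x l ih =>
      intro pre
      rw [List.foldl_cons]
      by_cases hp : pvIsImport x
      · rw [show pvBStep (pre, none) x = (pre, some []) by simp [pvBStep, hp]]
        rw [bfold_from_some l pre []]
        simp only [pvLastIdx?, List.findIdx?_cons, hp, if_pos]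
        cases h : pvLastIdx? pvIsImport l with
        | none => simp
        | some j => simp
      · rw [show pvBStep (pre, none) x = (pre ++ [x], none) by simp [pvBStep, hp]]
        rw [ih (pre ++ [x])]
        simp only [pvLastIdx?, List.findIdx?_cons, hp]
        cases h : pvLastIdx? pvIsImport l with
        | none => simp
        | some j =>
            simp only [Bool.false_eq_true, if_false]
            cases hf : l.findIdx? pvIsImport with
            | none => simp
            | some f => simp

-- ===== VERDICT (by name: the statement is the Claim_ definition above) =====
theorem replace_imports_py_spec : Claim_equal_replace_imports_py := by
  intro lines content _
  unfold Spec_replace_imports_py replace_imports_py replace_imports_py_alt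
  show (if ((PySem.List.enumerate lines).foldl pvStep (-1, -1)).1 = -1 then
      PySem.Str.splitlines content ++ [""] ++ lines
    else
      PySem.List.slice lines none
          (some ((PySem.List.enumerate lines).foldl pvStep (-1, -1)).1) ++
        PySem.Str.splitlines content ++
        PySem.List.slice lines
          (some (((PySem.List.enumerate lines).foldl pvStep (-1, -1)).2 + 1)) none)
    = (match (lines.foldl pvBStep ([], none)).2 with
       | none => PySem.Str.splitlines content ++ [""] ++ lines
       | some post => (lines.foldl pvBStep ([], none)).1 ++ PySem.Str.splitlines content ++ post)
  cases hf : lines.findIdx? pvIsImport with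
  | none =>
      have h1 := fold_fst_none lines 0 (-1) (by omega)
      rw [hf] at h1
      have hl : pvLastIdx? pvIsImport lines = none := by
        cases hl : pvLastIdx? pvIsImport lines with
        | none => rfl
        | some j =>
            exfalso
            obtain ⟨f, hfs⟩ := find_isSome_of_lastIdx lines j hl
            rw [hfs] at hf; simp at hf
      rw [if_pos h1, bfold_from_none lines [], hl]
  | some f =>
      have h1 : ((PySem.List.enumerate lines).foldl pvStep (-1, -1)).1 = (f : Int) := by
        have := fold_fst_none lines 0 (-1) (by omega)
        rw [hf] at this; simpa using this
      obtain ⟨j, hj⟩ := lastIdx?_isSome_of_find lines f hf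
      have h2 : ((PySem.List.enumerate lines).foldl pvStep (-1, -1)).2 = (j : Int) := by
        have := fold_snd lines 0 (-1, -1)
        rw [hj] at this; simpa using this
      rw [if_neg (by rw [h1]; omega), h1, h2, bfold_from_none lines [], hj]
      simp only [hf, List.nil_append]
      rw [PySem.List.slice_to_natCast]
      rw [show ((j : Int) + 1) = ((j + 1 : Nat) : Int) by push_cast; ring,
        PySem.List.slice_from_natCast]
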